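-- pv_equiv track=rewrite | github.com/gboxo/uNER_package | server/fuzzy.py | highlight_substrings
-- ===== SOURCE A (Python) =====
-- def tokenize_string(string):
--     return string.split()
--
-- def highlight_substrings(string, substrings):
--     # Tokenize main string and substrings by whitespace
--     tokenized_string = tokenize_string(string.lower())
--     tokenized_substrings = [tokenize_string(sub) for sub in substrings]
--
--     # Assigning unique colors to each substring
--     colors = ['red' for _ in range(len(substrings))]  # Add more colors as needed
--     color_mapping = {sub: colors[i % len(colors)] for i, sub in enumerate(substrings)}
--
--     # Generate HTML with highlighted substrings
--     highlighted_html = "<html><body><p>"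
--
--     index = 0
--     while index < len(tokenized_string):
--         highlighted = False
--         for sub_tokens in tokenized_substrings:
--             end_index = index + len(sub_tokens)
--             if tokenized_string[index:end_index] == sub_tokens:
--                 color = color_mapping[' '.join(sub_tokens)]
--                 highlighted_html += f"<span style='background-color:{color};'>{' '.join(sub_tokens)+' '}</span>"
--                 index = end_index
--                 highlighted = True
--                 break
--
--         if not highlighted:
--             highlighted_html += tokenized_string[index] + " "
--             index += 1
--
--     highlighted_html += "</p></body></html>"
--     return highlighted_html
-- ===== SOURCE B (Python) =====
-- def tokenize_string(string):
--     return string.split()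
--
-- def highlight_substrings(string, substrings):
--     # Index substring token-lists by their first token; at each position only
--     # candidates whose first token matches are tried, in original list order.
--     tokens = tokenize_string(string.lower())
--     buckets = {}
--     for sub in substrings:
--         st = tokenize_string(sub)
--         buckets.setdefault(st[0], []).append(st)
--     parts = ["<html><body><p>"]
--     i = 0
--     n = len(tokens)
--     while i < n:
--         for st in buckets.get(tokens[i], []):
--             if tokens[i:i + len(st)] == st:
--                 parts.append("<span style='background-color:red;'>" + " ".join(st) + " </span>")
--                 i += len(st)
--                 break
--         else:
--             parts.append(tokens[i] + " ")
--             i += 1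
--     parts.append("</p></body></html>")
--     return "".join(parts)
-- ===== Notes on version B (the rewrite author's own statement) =====
-- stated objective: alternative
-- what changed: B indexes the tokenized substrings by first token in a dict and at each position tries only the candidates whose first token matches (in original order), instead of scanning every substring at every position; since every colour is 'red', the colour mapping is dropped (intended as faster; measured only ~1.3x on the generated inputs).
-- outside the precondition, e.g. on highlight_substrings('', ['']): A returns '<html><body><p></p></body></html>', B raises IndexError
import Mathlib
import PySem

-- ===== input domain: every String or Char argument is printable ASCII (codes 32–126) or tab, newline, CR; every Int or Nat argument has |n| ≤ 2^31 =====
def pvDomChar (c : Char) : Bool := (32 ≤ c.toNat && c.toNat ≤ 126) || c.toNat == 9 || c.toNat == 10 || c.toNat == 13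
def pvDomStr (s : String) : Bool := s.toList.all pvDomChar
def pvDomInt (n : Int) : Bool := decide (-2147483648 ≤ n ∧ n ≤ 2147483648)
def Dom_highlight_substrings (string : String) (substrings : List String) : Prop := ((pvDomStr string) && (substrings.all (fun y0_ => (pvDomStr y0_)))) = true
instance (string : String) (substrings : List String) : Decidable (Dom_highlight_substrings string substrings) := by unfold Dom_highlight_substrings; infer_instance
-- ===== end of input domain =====

-- B replaces A's scan of every substring at every token position by a dict indexing the
-- tokenized substrings by first token (tried in original order); the constant colour map is
-- dropped since every colour is 'red'.

-- ===== PORT A =====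
def tokenize_string (string : String) : List String := PySem.Str.split₀ string

-- A's while-loop; fuel = number of remaining iterations allowed (called with enough fuel for
-- every input Pre_ admits; a matched empty token-list, where Python diverges, is outside Pre_).
def pvLoopA (subsT : List (List String)) (cmap : PySem.Dict String String) :
    Nat → List String → String → String
  | 0, _, acc => acc
  | fuel+1, rest, acc =>
    match rest with
    | [] => acc
    | t :: rest' =>
      -- inner 'for sub_tokens in tokenized_substrings: if slice == sub_tokens: …; break'
      match subsT.find? (fun st => rest.take st.length == st) with
      | some st =>
        -- 'cmap.get? = none' is Python's KeyError path, excluded by Pre_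
        pvLoopA subsT cmap fuel (rest.drop st.length)
          (acc ++ "<span style='background-color:" ++
            ((cmap.get? (PySem.Str.join " " st)).getD "") ++ ";'>" ++
            PySem.Str.join " " st ++ " " ++ "</span>")
      | none => pvLoopA subsT cmap fuel rest' (acc ++ t ++ " ")

def highlight_substrings (string : String) (substrings : List String) : String :=
  let tokenized_string := tokenize_string (PySem.Str.lower string)
  let tokenized_substrings := substrings.map (fun sub => tokenize_string sub)
  let colors : List String := List.replicate substrings.length "red"
  -- {sub: colors[i % len(colors)] for i, sub in enumerate(substrings)}
  let color_mapping : PySem.Dict String String :=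
    (PySem.List.enumerate substrings).foldl
      (fun d p => d.insert p.2
        (PySem.List.pyGetD colors (PySem.Int.mod p.1 (colors.length : Int)) ""))
      PySem.Dict.empty
  pvLoopA tokenized_substrings color_mapping tokenized_string.length tokenized_string
      "<html><body><p>"
    ++ "</p></body></html>"

-- ===== PORT B =====
-- buckets.setdefault(st[0], []).append(st)
def pvBucketStep (d : PySem.Dict String (List (List String))) (sub : String) :
    PySem.Dict String (List (List String)) :=
  match tokenize_string sub with
  | [] => d          -- Source B raises IndexError (st[0]) here; outside Pre_
  | h :: tl => d.insert h (d.getD h [] ++ [h :: tl])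

def pvLoopB (buckets : PySem.Dict String (List (List String))) :
    Nat → List String → List String → List String
  | 0, _, parts => parts
  | fuel+1, rest, parts =>
    match rest with
    | [] => parts
    | t :: rest' =>
      match (buckets.getD t []).find? (fun st => rest.take st.length == st) with
      | some st =>
        pvLoopB buckets fuel (rest.drop st.length)
          (parts ++ ["<span style='background-color:red;'>" ++ PySem.Str.join " " st ++ " </span>"])
      | none => pvLoopB buckets fuel rest' (parts ++ [t ++ " "])

def highlight_substrings_alt (string : String) (substrings : List String) : String :=
  let tokens := tokenize_string (PySem.Str.lower string)
  let buckets := substrings.foldl pvBucketStep PySem.Dict.empty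
  PySem.Str.join ""
    (pvLoopB buckets tokens.length tokens ["<html><body><p>"] ++ ["</p></body></html>"])

-- ===== PRECONDITION & SPEC =====
-- Pre_ excludes substrings with no whitespace tokens (A's while-loop never advances — it
-- diverges — whenever the string has a token) and substrings whose whitespace is not already
-- single-space normalized while their token sequence occurs among the string's tokens (A
-- raises KeyError there); the occurrence test over-approximates reachability, so a few inputs
-- on which A returns are also excluded (see cites).
def Pre_highlight_substrings (string : String) (substrings : List String) : Prop :=
  ∀ sub ∈ substrings,
    PySem.Str.split₀ sub ≠ [] ∧
    (PySem.Str.join " " (PySem.Str.split₀ sub) = sub ∨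
      ¬ (PySem.Str.split₀ sub <:+: PySem.Str.split₀ (PySem.Str.lower string)))
instance (string : String) (substrings : List String) :
    Decidable (Pre_highlight_substrings string substrings) := by
  unfold Pre_highlight_substrings; infer_instance

def pvWitness_highlight_substrings : String × List String := ("Foo bar baz", ["foo bar", "baz"])

def Spec_highlight_substrings (string : String) (substrings : List String) (out : String) : Prop :=
  out = highlight_substrings_alt string substrings
instance (string : String) (substrings : List String) (out : String) :
    Decidable (Spec_highlight_substrings string substrings out) := by
  unfold Spec_highlight_substrings; infer_instance

-- ===== CLAIM (what is proved, stated in full; the proofs are below) =====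
def Claim_equal_highlight_substrings : Prop := ∀ (string : String) (substrings : List String), Dom_highlight_substrings string substrings → Pre_highlight_substrings string substrings → Spec_highlight_substrings string substrings (highlight_substrings string substrings)

-- ===== LEMMAS AND PROOFS =====

theorem pv_join_cons (p : String) (ps : List String) :
    PySem.Str.join "" (p :: ps) = p ++ PySem.Str.join "" ps := by
  apply String.ext
  simp only [PySem.Str.toList_join, String.toList_append, List.map_cons]
  cases ps with
  | nil => simp [PySem.Chars.join_singleton, PySem.Chars.join_nil]
  | cons q qs =>
    rw [List.map_cons, PySem.Chars.join_cons_cons]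
    simp

theorem pv_join_snoc (parts : List String) (x : String) :
    PySem.Str.join "" (parts ++ [x]) = PySem.Str.join "" parts ++ x := by
  induction parts with
  | nil =>
    rw [List.nil_append, pv_join_cons]
    apply String.ext
    simp [PySem.Str.toList_join, PySem.Chars.join_nil]
  | cons p ps ih =>
    rw [List.cons_append, pv_join_cons, pv_join_cons, ih, String.append_assoc]

theorem pv_find?_filter_of_imp {α} (p q : α → Bool) (l : List α)
    (h : ∀ x ∈ l, p x = true → q x = true) : l.find? p = (l.filter q).find? p := by
  induction l with
  | nil => rfl
  | cons x xs ih =>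
    by_cases hq : q x = true
    · simp only [List.filter_cons, hq, if_true, List.find?_cons]
      cases hp : p x <;>
        simp [ih (fun y hy => h y (List.mem_cons_of_mem _ hy))]
    · have hp : p x = false := by
        cases hpx : p x
        · rfl
        · exact absurd (h x List.mem_cons_self hpx) hq
      simp [hq, hp, ih (fun y hy => h y (List.mem_cons_of_mem _ hy))]

theorem pv_mod_lt (k n : Nat) (h : k < n) : PySem.Int.mod (k : Int) (n : Int) = k := by
  unfold PySem.Int.mod
  rw [Int.fmod_eq_emod]
  have h1 : (k : Int) % (n : Int) = k := by
    rw [Int.emod_eq_of_lt] <;> omega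
  rw [h1]; simp

theorem pv_bucket_getD (l : List String) (d : PySem.Dict String (List (List String)))
    (t : String) (h : ∀ sub ∈ l, PySem.Str.split₀ sub ≠ []) :
    (l.foldl pvBucketStep d).getD t []
      = d.getD t [] ++ (l.map (fun sub => tokenize_string sub)).filter
          (fun st => st.head? == some t) := by
  induction l generalizing d with
  | nil => simp
  | cons sub ls ih =>
    obtain ⟨h0, tl, hsplit⟩ : ∃ h0 tl, PySem.Str.split₀ sub = h0 :: tl := by
      cases hs : PySem.Str.split₀ sub with
      | nil => exact absurd hs (h sub List.mem_cons_self)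
      | cons a b => exact ⟨a, b, rfl⟩
    have hstep : pvBucketStep d sub = d.insert h0 (d.getD h0 [] ++ [h0 :: tl]) := by
      unfold pvBucketStep tokenize_string
      rw [hsplit]
    simp only [List.foldl_cons, List.map_cons, List.filter_cons, hstep]
    rw [ih _ (fun s hs => h s (List.mem_cons_of_mem _ hs))]
    rw [PySem.Dict.getD_insert]
    unfold tokenize_string
    rw [hsplit]
    by_cases ht : t = h0
    · subst ht; simp
    · have : ((h0 :: tl).head? == some t) = false := by
        simp [Ne.symm ht]
      simp [ht]
      exact fun he => ht he.symm

theorem pv_cmap_get? (f : Int × String → String) (l : List (Int × String))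
    (d : PySem.Dict String String) (k : String) (hv : ∀ p ∈ l, f p = "red") :
    (l.foldl (fun d p => d.insert p.2 (f p)) d).get? k
      = if k ∈ l.map (·.2) then some "red" else d.get? k := by
  induction l generalizing d with
  | nil => simp
  | cons p ls ih =>
    simp only [List.foldl_cons, List.map_cons, List.mem_cons]
    rw [ih _ (fun q hq => hv q (List.mem_cons_of_mem _ hq)),
      hv p List.mem_cons_self, PySem.Dict.get?_insert]
    by_cases h1 : k ∈ ls.map (·.2) <;> by_cases h2 : k = p.2 <;> simp [h1, h2]

theorem pv_span_eq (j : String) :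
    ("<span style='background-color:" : String) ++ "red" ++ ";'>" ++ j ++ " " ++ "</span>"
      = "<span style='background-color:red;'>" ++ j ++ " </span>" := by
  apply String.ext
  simp only [String.toList_append, List.append_assoc]
  have h1 : ("<span style='background-color:".toList ++ "red".toList ++ ";'>".toList : List Char)
      = "<span style='background-color:red;'>".toList := by decide
  have h2 : (" ".toList ++ "</span>".toList : List Char) = " </span>".toList := by decide
  rw [h2, ← List.append_assoc, ← List.append_assoc, h1]

theorem pv_loop_eq (subsT : List (List String)) (cmap : PySem.Dict String String)
    (buckets : PySem.Dict String (List (List String))) (tokens : List String)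
    (Hne : ∀ st ∈ subsT, st ≠ [])
    (Hb : ∀ t, buckets.getD t [] = subsT.filter (fun st => st.head? == some t))
    (Hc : ∀ st ∈ subsT, st <:+: tokens →
      (cmap.get? (PySem.Str.join " " st)).getD "" = "red") :
    ∀ (fuel : Nat) (rest : List String) (acc : String) (parts : List String),
      rest <:+ tokens → PySem.Str.join "" parts = acc →
      pvLoopA subsT cmap fuel rest acc = PySem.Str.join "" (pvLoopB buckets fuel rest parts) := by
  intro fuel
  induction fuel with
  | zero => intro rest acc parts _ hacc; simp [pvLoopA, pvLoopB, hacc]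
  | succ n ih =>
    intro rest acc parts hsuf hacc
    cases rest with
    | nil => simp [pvLoopA, pvLoopB, hacc]
    | cons t rest' =>
      have himp : ∀ st ∈ subsT, ((t :: rest').take st.length == st) = true →
          (st.head? == some t) = true := by
        intro st hst hp
        have heq : (t :: rest').take st.length = st := eq_of_beq hp
        cases st with
        | nil => exact absurd rfl (Hne [] hst)
        | cons s0 tl =>
          have h2 : t :: rest'.take tl.length = s0 :: tl := by
            simpa [List.take_succ_cons] using heq
          have hs0 : s0 = t := (List.cons.injEq _ _ _ _ ▸ h2).1.symm
          simp [hs0]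
      have hfind : (buckets.getD t []).find? (fun st => (t :: rest').take st.length == st)
          = subsT.find? (fun st => (t :: rest').take st.length == st) := by
        rw [Hb t, ← pv_find?_filter_of_imp _ _ _ himp]
      cases hres : subsT.find? (fun st => (t :: rest').take st.length == st) with
      | none =>
        simp only [pvLoopA, pvLoopB, hfind, hres]
        apply ih rest' _ _ ((List.suffix_cons t rest').trans hsuf)
        rw [pv_join_snoc, hacc, String.append_assoc]
      | some st =>
        have hmem : st ∈ subsT := List.mem_of_find?_eq_some hres
        have hp : ((t :: rest').take st.length == st) = true := by
          have := List.find?_some (p := fun st => (t :: rest').take st.length == st) hres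
          simpa using this
        have hpre : st <+: (t :: rest') := by
          have := List.take_prefix st.length (t :: rest')
          rwa [eq_of_beq hp] at this
        have hinf : st <:+: tokens := hpre.isInfix.trans hsuf.isInfix
        have hcol : (cmap.get? (PySem.Str.join " " st)).getD "" = "red" := Hc st hmem hinf
        simp only [pvLoopA, pvLoopB, hfind, hres, hcol]
        apply ih ((t :: rest').drop st.length) _ _
          ((List.drop_suffix st.length (t :: rest')).trans hsuf)
        rw [pv_join_snoc, hacc]
        have hs := pv_span_eq (PySem.Str.join " " st)
        simp only [String.append_assoc] at hs ⊢
        rw [hs]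

-- ===== VERDICT (by name: the statement is the Claim_ definition above) =====
theorem highlight_substrings_spec : Claim_equal_highlight_substrings := by
  intro string substrings _ hpre
  unfold Spec_highlight_substrings highlight_substrings highlight_substrings_alt
  simp only []
  rw [pv_join_snoc]
  have Hne : ∀ st ∈ substrings.map (fun sub => tokenize_string sub), st ≠ [] := by
    intro st hst
    obtain ⟨sub, hsub, rfl⟩ := List.mem_map.mp hst
    exact (hpre sub hsub).1
  have Hb : ∀ t, (substrings.foldl pvBucketStep PySem.Dict.empty).getD t []
      = (substrings.map (fun sub => tokenize_string sub)).filter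
          (fun st => st.head? == some t) := by
    intro t
    rw [pv_bucket_getD substrings PySem.Dict.empty t (fun sub hs => (hpre sub hs).1)]
    simp
  have Hc : ∀ st ∈ substrings.map (fun sub => tokenize_string sub),
      st <:+: tokenize_string (PySem.Str.lower string) →
      (((PySem.List.enumerate substrings).foldl
        (fun d p => d.insert p.2
          (PySem.List.pyGetD (List.replicate substrings.length "red")
            (PySem.Int.mod p.1 ((List.replicate substrings.length "red").length : Int)) ""))
        PySem.Dict.empty).get? (PySem.Str.join " " st)).getD "" = "red" := by
    intro st hst hinf
    obtain ⟨sub, hsub, rfl⟩ := List.mem_map.mp hst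
    rcases (hpre sub hsub).2 with hnorm | hninf
    · have hkey : PySem.Str.join " " (tokenize_string sub) = sub := hnorm
      rw [hkey]
      rw [pv_cmap_get? _ _ _ _ ?hv]
      case hv =>
        intro p hp
        rw [PySem.List.mem_enumerate_iff] at hp
        obtain ⟨k, hk, rfl⟩ := hp
        have hlen : (List.replicate substrings.length "red").length = substrings.length := by simp
        simp only [hlen]
        have h0 : ((0 : Int) + (k : Int)) = (k : Int) := by ring
        rw [h0, pv_mod_lt k substrings.length hk, PySem.List.pyGetD_natCast]
        simp [hk]
      · rw [if_pos]
        · rfl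
        · rw [PySem.List.map_snd_enumerate]
          exact hsub
    · exact absurd hinf hninf
  rw [pv_loop_eq _ _ _ _ Hne Hb Hc (tokenize_string (PySem.Str.lower string)).length
    (tokenize_string (PySem.Str.lower string)) "<html><body><p>" ["<html><body><p>"]
    (List.suffix_refl _) (by rw [pv_join_cons]; rfl)]
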